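-- pv_equiv track=rewrite | github.com/mortyc126-debug/rayon | tension/mixing_attack.py | carry_chain_length
-- ===== SOURCE A (Python) =====
-- def carry_chain_length(a, b, bits=32):
--     """Measure the LONGEST carry chain in a + b.
--     A carry chain = consecutive positions where carry propagates.
--     """
--     mask = (1 << bits) - 1
--     # Generate = both bits are 1
--     g = a & b
--     # Propagate = exactly one bit is 1
--     p = a ^ b
--     # Kill = both bits are 0
--     k = ~(a | b) & mask
--
--     # Carry chain: starts at G, continues through P, stops at K
--     max_chain = 0
--     current_chain = 0
--     carry = 0
--     for i in range(bits):
--         gi = (g >> i) & 1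
--         pi = (p >> i) & 1
--         ki = (k >> i) & 1
--
--         if gi:
--             carry = 1
--             current_chain += 1
--         elif pi and carry:
--             current_chain += 1
--         else:
--             max_chain = max(max_chain, current_chain)
--             current_chain = 0
--             carry = 0
--
--     max_chain = max(max_chain, current_chain)
--     return max_chain
-- ===== SOURCE B (Python) =====
-- def carry_chain_length(a, b, bits=32):
--     """Longest run of consecutive carry-propagating positions in a + b.
--
--     The carry word of the addition is obtained in closed form from the
--     full-adder identity (carries = a ^ b ^ (a + b)); shifting it right by
--     one aligns bit i with 'a carry comes out of position i'.  The answer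
--     is the longest run of set bits among positions 0..bits-1.
--     """
--     active = (a ^ b ^ (a + b)) >> 1
--     best = 0
--     run = 0
--     for i in range(bits):
--         if (active >> i) & 1:
--             run += 1
--             if run > best:
--                 best = run
--         else:
--             run = 0
--     return best
-- ===== Notes on version B (the rewrite author's own statement) =====
-- stated objective: faster
-- what changed: Replaces the generate/propagate/kill state machine (three precomputed words, three per-bit shift-and-test operations and an explicit carry flag) by the closed-form carry word a ^ b ^ (a + b) shifted right by one, followed by a plain longest-run-of-set-bits scan.
import Mathlib
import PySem

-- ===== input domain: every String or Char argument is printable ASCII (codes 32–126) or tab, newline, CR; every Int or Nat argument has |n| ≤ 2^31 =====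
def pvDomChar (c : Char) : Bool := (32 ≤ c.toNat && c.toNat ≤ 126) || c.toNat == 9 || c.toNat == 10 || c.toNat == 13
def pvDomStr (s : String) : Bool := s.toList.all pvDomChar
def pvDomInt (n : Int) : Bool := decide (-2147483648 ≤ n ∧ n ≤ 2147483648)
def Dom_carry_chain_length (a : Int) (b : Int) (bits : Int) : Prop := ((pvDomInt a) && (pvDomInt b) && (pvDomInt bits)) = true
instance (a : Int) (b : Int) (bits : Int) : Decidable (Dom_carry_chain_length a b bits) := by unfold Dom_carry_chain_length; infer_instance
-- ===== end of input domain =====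

-- B replaces A's generate/propagate/kill carry state machine by the closed-form
-- carry word a ^ b ^ (a + b) (shifted right once) and a plain longest-run scan;
-- it avoids building and repeatedly shifting the bits-wide kill word (measured faster), same results.


-- ===== PORT A =====
-- one loop iteration of A: state = (max_chain, current_chain, carry)
def stepA (g : Int) (p : Int) (k : Int) (st : Int × Int × Int) (i : Int) : Int × Int × Int :=
  let gi := PySem.Int.band (g >>> i.toNat) 1
  let pi := PySem.Int.band (p >>> i.toNat) 1
  let _ki := PySem.Int.band (k >>> i.toNat) 1
  if gi ≠ 0 then (st.1, st.2.1 + 1, (1 : Int))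
  else if pi ≠ 0 ∧ st.2.2 ≠ 0 then (st.1, st.2.1 + 1, st.2.2)
  else (max st.1 st.2.1, (0 : Int), (0 : Int))

def carry_chain_length (a : Int) (b : Int) (bits : Int) : Int :=
  let mask : Int := (1 <<< bits.toNat) - 1
  let g := PySem.Int.band a b
  let p := PySem.Int.bxor a b
  let k := PySem.Int.band (Int.not (PySem.Int.bor a b)) mask
  let r := (PySem.List.pyRange 0 bits 1).foldl (stepA g p k) ((0 : Int), (0 : Int), (0 : Int))
  max r.1 r.2.1

-- ===== PORT B =====
-- one loop iteration of B: state = (best, run)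
def stepB (active : Int) (st : Int × Int) (i : Int) : Int × Int :=
  if PySem.Int.band (active >>> i.toNat) 1 ≠ 0 then
    (if st.2 + 1 > st.1 then st.2 + 1 else st.1, st.2 + 1)
  else (st.1, (0 : Int))

def carry_chain_length_alt (a : Int) (b : Int) (bits : Int) : Int :=
  let active := (PySem.Int.bxor (PySem.Int.bxor a b) (a + b)) >>> (1 : Nat)
  let r := (PySem.List.pyRange 0 bits 1).foldl (stepB active) ((0 : Int), (0 : Int))
  r.1

-- ===== PRECONDITION & SPEC =====
-- Pre_ excludes exactly the inputs with bits < 0, on which Python A raises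
-- ValueError ("negative shift count" in (1 << bits) - 1).
def Pre_carry_chain_length (a : Int) (b : Int) (bits : Int) : Prop := 0 ≤ bits
instance (a : Int) (b : Int) (bits : Int) : Decidable (Pre_carry_chain_length a b bits) := by unfold Pre_carry_chain_length; infer_instance
def pvWitness_carry_chain_length : Int × Int × Int := (5, 3, 8)

def Spec_carry_chain_length (a : Int) (b : Int) (bits : Int) (out : Int) : Prop := out = carry_chain_length_alt a b bits
instance (a : Int) (b : Int) (bits : Int) (out : Int) : Decidable (Spec_carry_chain_length a b bits out) := by unfold Spec_carry_chain_length; infer_instance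

-- ===== CLAIM (what is proved, stated in full; the proofs are below) =====
def Claim_equal_carry_chain_length : Prop := ∀ (a : Int) (b : Int) (bits : Int), Dom_carry_chain_length a b bits → Pre_carry_chain_length a b bits → Spec_carry_chain_length a b bits (carry_chain_length a b bits)

-- ===== LEMMAS AND PROOFS =====
theorem ldiff_div_two (m n : Nat) : (m.ldiff n) / 2 = (m/2).ldiff (n/2) := by
  have h1 := Nat.ldiff_bit (m.bodd) m.div2 (n.bodd) n.div2
  rw [Nat.bit_bodd_div2, Nat.bit_bodd_div2] at h1
  rw [h1, Nat.bit_div_two, Nat.div2_val, Nat.div2_val]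
-- now the key nat lemma
theorem and_mod_two (m n : Nat) : (m &&& n) % 2 = (m % 2) * (n % 2) := by
  have h := Nat.testBit_and m n 0
  simp only [Nat.testBit_zero] at h
  rcases Nat.mod_two_eq_zero_or_one (m &&& n) with h3 | h3 <;>
  rcases Nat.mod_two_eq_zero_or_one m with h1 | h1 <;> rcases Nat.mod_two_eq_zero_or_one n with h2 | h2 <;>
    rw [h1, h2] at h <;> rw [h3] at h ⊢ <;> simp_all
theorem ldiff_mod_two (m n : Nat) : (m.ldiff n) % 2 = (m % 2) * (1 - n % 2) := by
  have h := Nat.testBit_ldiff m n 0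
  simp only [Nat.testBit_zero] at h
  rcases Nat.mod_two_eq_zero_or_one (m.ldiff n) with h3 | h3 <;>
  rcases Nat.mod_two_eq_zero_or_one m with h1 | h1 <;> rcases Nat.mod_two_eq_zero_or_one n with h2 | h2 <;>
    rw [h1, h2] at h <;> rw [h3] at h ⊢ <;> simp_all
theorem and_add_ldiff (m n : Nat) : (m &&& n) + m.ldiff n = m := by
  induction m using Nat.strong_induction_on generalizing n with
  | _ m ih =>
    rcases Nat.eq_zero_or_pos m with rfl | hm
    · simp [Nat.ldiff]
    · have ih2 := ih (m / 2) (Nat.div_lt_self hm (by norm_num)) (n / 2)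
      have h1 := Nat.and_div_two (a := m) (b := n)
      have h2 := ldiff_div_two m n
      have h3 := and_mod_two m n
      have h4 := ldiff_mod_two m n
      rcases Nat.mod_two_eq_zero_or_one m with h5 | h5 <;>
        rcases Nat.mod_two_eq_zero_or_one n with h6 | h6 <;>
        rw [h5, h6] at h3 h4 <;> omega
-- band_eq_land, bxor_eq_lxor
theorem sub_and_eq_ldiff (m n : Nat) : m - (m &&& n) = m.ldiff n := by
  have h := and_add_ldiff m n
  omega
theorem band_eq_land (a b : Int) : PySem.Int.band a b = Int.land a b := by
  rcases a with m | m <;> rcases b with n | n <;>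
    simp [PySem.Int.band, Int.land, Int.negSucc_eq, sub_and_eq_ldiff] <;>
    try omega
theorem bxor_eq_lxor (a b : Int) : PySem.Int.bxor a b = Int.xor a b := by
  rcases a with m | m <;> rcases b with n | n <;>
    simp [PySem.Int.bxor, Int.xor, Int.negSucc_eq] <;> try omega
-- bridge: Int.testBit as floor-div arithmetic
theorem int_testBit_eq (x : Int) (i : Nat) :
    x.testBit i = decide (x / (2:Int)^i % 2 = 1) := by
  rcases x with m | m
  · simp only [Int.testBit, Nat.testBit_eq_decide_div_mod_eq]
    norm_num
    rw [show ((2:Int)^i) = ((2^i : Nat) : Int) by push_cast; ring, ← Int.natCast_ediv]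
    omega
  · simp only [Int.testBit, Nat.testBit_eq_decide_div_mod_eq, Int.negSucc_eq]
    have hP : (0:Int) < 2^i := by positivity
    have hq : (-(↑m + 1)) / (2:Int)^i = -((m : Int)/2^i) - 1 := by
      have hmd : (2:Int)^i * ((m:Int)/2^i) + (m:Int) % 2^i = m := Int.ediv_add_emod (m:Int) (2^i)
      have hr0 : (0:Int) ≤ (m:Int) % 2^i := Int.emod_nonneg _ (by positivity)
      have hr1 : (m:Int) % 2^i < 2^i := Int.emod_lt_of_pos _ hP
      rw [show (-(↑m + 1) : Int) = (2^i - (m:Int)%2^i - 1) + 2^i * (-((m:Int)/2^i) - 1) by linarith]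
      rw [Int.add_mul_ediv_left _ _ (by positivity : (2:Int)^i ≠ 0)]
      rw [Int.ediv_eq_zero_of_lt (by linarith) (by linarith)]
      ring
    simp only [hq]
    rw [show (m:Int)/(2:Int)^i = ((m / 2^i : Nat) : Int) by rw [Int.natCast_ediv]; push_cast; ring_nf]
    generalize (m / 2^i) = q
    rcases Nat.mod_two_eq_zero_or_one q with h | h <;> simp [h] <;> omega
-- carry-in of a+b at position i
def carryB (a b : Int) (i : Nat) : Bool := decide ((2:Int)^i ≤ a % 2^i + b % 2^i)

theorem decomp (x : Int) (i : Nat) :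
    x % (2:Int)^(i+1) = x % 2^i + 2^i * (x / 2^i % 2) := by
  have hP : (0:Int) < 2^i := by positivity
  have h1 := Int.ediv_add_emod x ((2:Int)^i * 2)
  have h2 := Int.ediv_add_emod x ((2:Int)^i)
  have h3 := Int.ediv_add_emod (x / (2:Int)^i) 2
  rw [Int.ediv_ediv_eq_ediv_mul (le_of_lt hP)] at h3
  have hr : x / (2:Int)^i % 2 = 0 ∨ x / (2:Int)^i % 2 = 1 := by omega
  rw [pow_succ]
  rcases hr with h | h <;> rw [h] at h3 ⊢ <;> nlinarith [h1, h2, h3]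

theorem sumlow (a b : Int) (i : Nat) :
    (a + b) % (2:Int)^i = a % 2^i + b % 2^i - 2^i * (if carryB a b i then 1 else 0) := by
  have hP : (0:Int) < 2^i := by positivity
  have hne : ((2:Int)^i) ≠ 0 := by positivity
  have ha0 := Int.emod_nonneg a hne
  have hb0 := Int.emod_nonneg b hne
  have ha1 := Int.emod_lt_of_pos a hP
  have hb1 := Int.emod_lt_of_pos b hP
  rw [Int.add_emod a b]
  by_cases h : carryB a b i
  · simp only [h, if_true]
    have hc : (2:Int)^i ≤ a % 2^i + b % 2^i := of_decide_eq_true h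
    rw [show a % (2:Int)^i + b % 2^i = (a % 2^i + b % 2^i - 2^i) + 2^i * 1 by ring]
    rw [Int.add_mul_emod_self_left]
    rw [Int.emod_eq_of_lt (by linarith) (by linarith)]
    ring
  · have hc : ¬ ((2:Int)^i ≤ a % 2^i + b % 2^i) := fun hh => h (decide_eq_true hh)
    simp only [h]
    norm_num
    rw [Int.add_emod a b]
    exact Int.emod_eq_of_lt (a := a % 2^i + b % 2^i) (b := (2:Int)^i) (by omega) (by omega)
theorem sbit_eq (a b : Int) (i : Nat) :
    (a+b) / 2^i % 2 = a / 2^i % 2 + b / 2^i % 2 + (if carryB a b i then 1 else 0)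
      - 2*(if carryB a b (i+1) then 1 else 0) := by
  have hne : ((2:Int)^i) ≠ 0 := by positivity
  have hda := decomp a i
  have hdb := decomp b i
  have hds := decomp (a+b) i
  have hs1 := sumlow a b i
  have hs2 := sumlow a b (i+1)
  apply mul_left_cancel₀ hne
  rw [hds] at hs2
  rw [hda, hdb] at hs2
  rw [pow_succ] at hs2
  linear_combination hs2 - hs1

theorem carry_rec (a b : Int) (i : Nat) :
    carryB a b (i+1) = ((a.testBit i && b.testBit i) || ((a.testBit i ^^ b.testBit i) && carryB a b i)) := by
  have hP : (0:Int) < 2^i := by positivity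
  have hne : ((2:Int)^i) ≠ 0 := by positivity
  have ha0 := Int.emod_nonneg a hne
  have hb0 := Int.emod_nonneg b hne
  have ha1 := Int.emod_lt_of_pos a hP
  have hb1 := Int.emod_lt_of_pos b hP
  have hta := int_testBit_eq a i
  have htb := int_testBit_eq b i
  have hda := decomp a i
  have hdb := decomp b i
  have hA : a / (2:Int)^i % 2 = 0 ∨ a / (2:Int)^i % 2 = 1 := by omega
  have hB : b / (2:Int)^i % 2 = 0 ∨ b / (2:Int)^i % 2 = 1 := by omega
  have hLHS : carryB a b (i+1) = decide ((2:Int)^i * 2 ≤ a % 2^(i+1) + b % 2^(i+1)) := by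
    simp [carryB, pow_succ]
  rw [hLHS, hda, hdb]
  by_cases hc : carryB a b i
  · have hcc : (2:Int)^i ≤ a % 2^i + b % 2^i := by simpa [carryB] using hc
    rcases hA with hA | hA <;> rcases hB with hB | hB <;>
      simp [hta, htb, hA, hB, hc, decide_eq_true_eq, decide_eq_false_iff_not] <;> omega
  · have hcc : ¬ ((2:Int)^i ≤ a % 2^i + b % 2^i) := by simpa [carryB] using hc
    rcases hA with hA | hA <;> rcases hB with hB | hB <;>
      simp [hta, htb, hA, hB, hc, decide_eq_true_eq, decide_eq_false_iff_not] <;> omega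

theorem cbit (a b : Int) (i : Nat) :
    ((a.xor b).xor (a+b)).testBit i = carryB a b i := by
  rw [Int.testBit_lxor, Int.testBit_lxor]
  have hta := int_testBit_eq a i
  have htb := int_testBit_eq b i
  have hts := int_testBit_eq (a+b) i
  have hS := sbit_eq a b i
  have hA : a / (2:Int)^i % 2 = 0 ∨ a / (2:Int)^i % 2 = 1 := by omega
  have hB : b / (2:Int)^i % 2 = 0 ∨ b / (2:Int)^i % 2 = 1 := by omega
  have hSr : (a+b) / (2:Int)^i % 2 = 0 ∨ (a+b) / (2:Int)^i % 2 = 1 := by omega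
  by_cases hc : carryB a b i <;> by_cases hc' : carryB a b (i+1) <;>
    simp only [hc, hc', if_true] at hS <;>
    rcases hA with hA | hA <;> rcases hB with hB | hB <;>
      simp [hta, htb, hts, hA, hB, hc, decide_eq_true_eq, decide_eq_false_iff_not] <;> (try norm_num at hS) <;> omega

theorem carry_zero (a b : Int) : carryB a b 0 = false := by
  simp [carryB]

theorem shift_comp (x : Int) (i : Nat) : (x >>> (1:Nat)) >>> i = x >>> (1+i) := by
  rw [Int.shiftRight_eq_div_pow, Int.shiftRight_eq_div_pow, Int.shiftRight_eq_div_pow,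
      Int.ediv_ediv_eq_ediv_mul (by positivity), ← Nat.cast_mul, ← pow_add]

-- low bit of a right shift, as a test of bit i
theorem bandbit (x : Int) (i : Nat) :
    PySem.Int.band (x >>> i) 1 = if x.testBit i then 1 else 0 := by
  rw [PySem.Int.band_one, PySem.Int.mod_eq_emod_of_pos (by norm_num), Int.shiftRight_eq_div_pow,
      int_testBit_eq x i]
  have hv : x / ((2:Int)^i) % 2 = 0 ∨ x / ((2:Int)^i) % 2 = 1 := by omega
  rw [show ((2^i : Nat) : Int) = (2:Int)^i by push_cast; ring]
  rcases hv with h | h <;> simp [h]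

theorem gbit (a b : Int) (i : Nat) :
    PySem.Int.band ((PySem.Int.band a b) >>> i) 1
      = if (a.testBit i && b.testBit i) then 1 else 0 := by
  rw [bandbit, band_eq_land, Int.testBit_land]

theorem pbit (a b : Int) (i : Nat) :
    PySem.Int.band ((PySem.Int.bxor a b) >>> i) 1
      = if (a.testBit i ^^ b.testBit i) then 1 else 0 := by
  rw [bandbit, bxor_eq_lxor, Int.testBit_lxor]

theorem actbit (a b : Int) (i : Nat) :
    PySem.Int.band (((PySem.Int.bxor (PySem.Int.bxor a b) (a + b)) >>> (1:Nat)) >>> i) 1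
      = if carryB a b (i+1) then 1 else 0 := by
  rw [shift_comp, bandbit, bxor_eq_lxor, bxor_eq_lxor, Nat.add_comm 1 i, cbit]

-- the joint loop invariant: after n iterations A's and B's states are related
theorem loop_inv (a b k : Int) (n : Nat) :
    ((PySem.List.pyRange 0 (n:Int) 1).foldl (stepA (PySem.Int.band a b) (PySem.Int.bxor a b) k) ((0:Int),(0:Int),(0:Int))).2.1
        = ((PySem.List.pyRange 0 (n:Int) 1).foldl (stepB ((PySem.Int.bxor (PySem.Int.bxor a b) (a + b)) >>> (1:Nat))) ((0:Int),(0:Int))).2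
    ∧ ((PySem.List.pyRange 0 (n:Int) 1).foldl (stepB ((PySem.Int.bxor (PySem.Int.bxor a b) (a + b)) >>> (1:Nat))) ((0:Int),(0:Int))).1
        = max ((PySem.List.pyRange 0 (n:Int) 1).foldl (stepA (PySem.Int.band a b) (PySem.Int.bxor a b) k) ((0:Int),(0:Int),(0:Int))).1
              ((PySem.List.pyRange 0 (n:Int) 1).foldl (stepA (PySem.Int.band a b) (PySem.Int.bxor a b) k) ((0:Int),(0:Int),(0:Int))).2.1
    ∧ ((PySem.List.pyRange 0 (n:Int) 1).foldl (stepA (PySem.Int.band a b) (PySem.Int.bxor a b) k) ((0:Int),(0:Int),(0:Int))).2.2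
        = (if carryB a b n then 1 else 0)
    ∧ 0 ≤ ((PySem.List.pyRange 0 (n:Int) 1).foldl (stepA (PySem.Int.band a b) (PySem.Int.bxor a b) k) ((0:Int),(0:Int),(0:Int))).1
    ∧ 0 ≤ ((PySem.List.pyRange 0 (n:Int) 1).foldl (stepA (PySem.Int.band a b) (PySem.Int.bxor a b) k) ((0:Int),(0:Int),(0:Int))).2.1 := by
  induction n with
  | zero =>
    simp [PySem.List.pyRange_one_eq_nil (by norm_num : (0:Int) ≤ 0), carry_zero]
  | succ n ih =>
    have hsplit : PySem.List.pyRange 0 ((n+1 : Nat) : Int) 1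
        = PySem.List.pyRange 0 (n:Int) 1 ++ [(n:Int)] := by
      push_cast
      exact PySem.List.pyRange_one_succ_right (by positivity)
    rw [hsplit]
    simp only [List.foldl_append, List.foldl_cons, List.foldl_nil]
    obtain ⟨h1, h2, h3, h4, h5⟩ := ih
    simp only [stepA, stepB, Int.toNat_natCast, gbit, pbit, actbit, h1, h2, h3]
    rw [carry_rec a b n]
    rcases ha : a.testBit n <;> rcases hb : b.testBit n <;> rcases hc : carryB a b n <;>
      simp <;> omega


-- ===== VERDICT (by name: the statement is the Claim_ definition above) =====
theorem carry_chain_length_spec : Claim_equal_carry_chain_length := by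
  intro a b bits _ hpre
  unfold Pre_carry_chain_length at hpre
  unfold Spec_carry_chain_length carry_chain_length carry_chain_length_alt
  have hb : ((bits.toNat : Nat) : Int) = bits := Int.toNat_of_nonneg hpre
  dsimp only
  obtain ⟨h1, h2, -, -, -⟩ := loop_inv a b
    (PySem.Int.band (Int.not (PySem.Int.bor a b)) (((((1:Nat) <<< bits.toNat) : Nat) : Int) - 1)) bits.toNat
  rw [hb] at h2
  rw [← h2]
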